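-- pv_equiv track=rewrite | github.com/tomputer-g/16891-mapf-darpa | single_agent_planner.py | is_valid_motion
-- ===== SOURCE A (Python) =====
-- from typing import List, Dict, Tuple, Set
--
-- def is_valid_motion(old_loc, new_loc: List[Tuple[int]]):
--     ##############################
--     # Task 1.3/1.4: Check if a move from old_loc to new_loc is valid
--     # Check if two agents are in the same location (vertex collision)
--
--     num_agents = len(old_loc)
--     vertex_occupied_new_loc: Set = set(new_loc)
--     if len(vertex_occupied_new_loc) < num_agents:
--         # This means there were duplicates removed when constructing a set, therefore a vertex was occupied at the same time by two agents
--         return False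
--
--     # Check edge collision
--     for i in range(num_agents):
--         for j in range(i + 1, num_agents):
--             if old_loc[i] == new_loc[j] and old_loc[j] == new_loc[i]:
--                 # Edge collision detected, two agents swapped places
--                 return False
--
--     return True
-- ===== SOURCE B (Python) =====
-- def is_valid_motion(old_loc, new_loc):
--     num_agents = len(old_loc)
--     if len(set(new_loc)) < num_agents:
--         return False
--     # Count each (arrival, departure) move once, then for each agent ask whether
--     # its reversed move exists among the others (an agent staying put matches its
--     # own key, hence needs a count of 2).
--     cnt = {}
--     for j in range(num_agents):
--         key = (new_loc[j], old_loc[j])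
--         cnt[key] = cnt.get(key, 0) + 1
--     for i in range(num_agents):
--         a, b = old_loc[i], new_loc[i]
--         need = 2 if a == b else 1
--         if cnt.get((a, b), 0) >= need:
--             return False
--     return True
-- ===== Notes on version B (the rewrite author's own statement) =====
-- stated objective: alternative
-- what changed: The pairwise nested swap scan is replaced by building a counting dict of (arrival, departure) moves once and doing a single pass that looks up each move's reverse (a stationary agent needs count 2 to exclude its own key).
import Mathlib
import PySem

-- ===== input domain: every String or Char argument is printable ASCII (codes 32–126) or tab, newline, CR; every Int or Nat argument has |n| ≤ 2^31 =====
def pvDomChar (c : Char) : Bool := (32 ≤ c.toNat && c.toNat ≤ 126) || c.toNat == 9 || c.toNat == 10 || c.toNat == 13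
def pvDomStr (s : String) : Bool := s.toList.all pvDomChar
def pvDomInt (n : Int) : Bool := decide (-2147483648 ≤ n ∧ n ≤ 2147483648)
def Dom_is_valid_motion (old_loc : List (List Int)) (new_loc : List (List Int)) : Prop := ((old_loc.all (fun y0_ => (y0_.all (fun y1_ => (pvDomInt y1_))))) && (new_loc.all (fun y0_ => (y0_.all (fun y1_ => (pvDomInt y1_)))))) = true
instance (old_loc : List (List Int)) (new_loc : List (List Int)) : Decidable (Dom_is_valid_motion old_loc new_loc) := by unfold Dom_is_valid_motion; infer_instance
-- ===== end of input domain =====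

-- B replaces A's pairwise nested swap scan by a counting dict of (arrival, departure)
-- moves and a single pass looking up each move's reverse (objective: alternative).

-- ===== PORT A =====
-- nested 'for i in range(num_agents): for j in range(i+1, num_agents):' with early
-- 'return False' ported as nested .any; indexing old_loc[i]/new_loc[j] is always in
-- range when reached (the vertex check guarantees len(new_loc) ≥ num_agents), ported
-- with pyGetD (default never read).
def is_valid_motion (old_loc : List (List Int)) (new_loc : List (List Int)) : Bool :=
  let num_agents := PySem.List.len old_loc
  if PySem.Set.len (PySem.Set.ofList new_loc) < num_agents then false
  else if (PySem.List.pyRange 0 num_agents 1).any (fun i =>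
      (PySem.List.pyRange (i + 1) num_agents 1).any (fun j =>
        (PySem.List.pyGetD old_loc i [] == PySem.List.pyGetD new_loc j []) &&
        (PySem.List.pyGetD old_loc j [] == PySem.List.pyGetD new_loc i [])))
  then false else true

-- ===== PORT B =====
-- Source B's counting dict 'cnt[key] = cnt.get(key, 0) + 1' is the foldl of Dict.insert;
-- the temporaries key/a/b/need of Source B are inlined.
def is_valid_motion_alt (old_loc : List (List Int)) (new_loc : List (List Int)) : Bool :=
  let num_agents := PySem.List.len old_loc
  if PySem.Set.len (PySem.Set.ofList new_loc) < num_agents then false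
  else if (PySem.List.pyRange 0 num_agents 1).any (fun i =>
      decide ((if PySem.List.pyGetD old_loc i [] == PySem.List.pyGetD new_loc i []
               then (2 : Int) else 1) ≤
        PySem.Dict.getD
          ((PySem.List.pyRange 0 num_agents 1).foldl (fun d j =>
            PySem.Dict.insert d (PySem.List.pyGetD new_loc j [], PySem.List.pyGetD old_loc j [])
              (PySem.Dict.getD d (PySem.List.pyGetD new_loc j [], PySem.List.pyGetD old_loc j []) 0 + 1))
            PySem.Dict.empty)
          (PySem.List.pyGetD old_loc i [], PySem.List.pyGetD new_loc i []) 0))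
  then false else true

-- ===== PRECONDITION & SPEC =====
def Spec_is_valid_motion (old_loc : List (List Int)) (new_loc : List (List Int)) (out : Bool) : Prop := out = is_valid_motion_alt old_loc new_loc
instance (old_loc : List (List Int)) (new_loc : List (List Int)) (out : Bool) : Decidable (Spec_is_valid_motion old_loc new_loc out) := by unfold Spec_is_valid_motion; infer_instance

-- ===== CLAIM (what is proved, stated in full; the proofs are below) =====
def Claim_equal_is_valid_motion : Prop := ∀ (old_loc : List (List Int)) (new_loc : List (List Int)), Dom_is_valid_motion old_loc new_loc → Spec_is_valid_motion old_loc new_loc (is_valid_motion old_loc new_loc)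

-- ===== LEMMAS AND PROOFS =====

lemma two_le_countP {α : Type} {l : List α} {p : α → Bool} (hnd : l.Nodup)
    {a b : α} (ha : a ∈ l) (hb : b ∈ l) (hab : a ≠ b)
    (hpa : p a = true) (hpb : p b = true) : 2 ≤ l.countP p := by
  rw [List.countP_eq_length_filter]
  have hnd' := hnd.filter p
  have ha' : a ∈ l.filter p := List.mem_filter.mpr ⟨ha, hpa⟩
  have hb' : b ∈ l.filter p := List.mem_filter.mpr ⟨hb, hpb⟩
  rcases h : l.filter p with _ | ⟨x, _ | ⟨y, t⟩⟩
  · simp [h] at ha'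
  · rw [h] at ha' hb'; simp at ha' hb'; exact absurd (ha'.trans hb'.symm) hab
  · simp

lemma exists_two_of_two_le_countP {α : Type} {l : List α} {p : α → Bool} (hnd : l.Nodup)
    (h : 2 ≤ l.countP p) : ∃ a ∈ l, ∃ b ∈ l, a ≠ b ∧ p a = true ∧ p b = true := by
  rw [List.countP_eq_length_filter] at h
  rcases hf : l.filter p with _ | ⟨x, _ | ⟨y, t⟩⟩ <;> rw [hf] at h <;> try simp at h
  have hnd' := hnd.filter p
  rw [hf] at hnd'
  have hx : x ∈ l.filter p := by rw [hf]; simp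
  have hy : y ∈ l.filter p := by rw [hf]; simp
  have hxy : x ≠ y := by intro e; subst e; simp at hnd'
  exact ⟨x, (List.mem_filter.mp hx).1, y, (List.mem_filter.mp hy).1, hxy,
    (List.mem_filter.mp hx).2, (List.mem_filter.mp hy).2⟩

lemma pair_of_ne (o w : List (List Int)) (n i j : Int)
    (h0i : 0 ≤ i) (hin : i < n) (hj : 0 ≤ j ∧ j < n) (hne : i ≠ j)
    (h1 : PySem.List.pyGetD o i [] = PySem.List.pyGetD w j [])
    (h2 : PySem.List.pyGetD o j [] = PySem.List.pyGetD w i []) :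
    ∃ i', (0 ≤ i' ∧ i' < n) ∧ ∃ j', (i' + 1 ≤ j' ∧ j' < n) ∧
      PySem.List.pyGetD o i' [] = PySem.List.pyGetD w j' [] ∧
      PySem.List.pyGetD o j' [] = PySem.List.pyGetD w i' [] := by
  rcases lt_or_gt_of_ne hne with h | h
  · exact ⟨i, ⟨h0i, hin⟩, j, ⟨by omega, hj.2⟩, h1, h2⟩
  · exact ⟨j, hj, i, ⟨by omega, hin⟩, h2, h1⟩

-- B's counter lookup is a count over the move list
lemma cnt_getD (o w : List (List Int)) (n : Int) (v : List Int × List Int) :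
    PySem.Dict.getD
      ((PySem.List.pyRange 0 n 1).foldl (fun d j =>
        PySem.Dict.insert d (PySem.List.pyGetD w j [], PySem.List.pyGetD o j [])
          (PySem.Dict.getD d (PySem.List.pyGetD w j [], PySem.List.pyGetD o j []) 0 + 1))
        PySem.Dict.empty) v 0
    = (((PySem.List.pyRange 0 n 1).map (fun j =>
        (PySem.List.pyGetD w j [], PySem.List.pyGetD o j []))).count v : Int) := by
  rw [← List.foldl_map (f := fun j => (PySem.List.pyGetD w j [], PySem.List.pyGetD o j []))
        (g := fun d x => PySem.Dict.insert d x (PySem.Dict.getD d x 0 + 1))]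
  rw [PySem.Dict.getD_foldl_insert_add_one]
  simp

-- the two edge scans agree
lemma edge_scan_eq (o w : List (List Int)) (n : Int) :
    ((PySem.List.pyRange 0 n 1).any (fun i =>
      (PySem.List.pyRange (i + 1) n 1).any (fun j =>
        (PySem.List.pyGetD o i [] == PySem.List.pyGetD w j []) &&
        (PySem.List.pyGetD o j [] == PySem.List.pyGetD w i []))))
  = ((PySem.List.pyRange 0 n 1).any (fun i =>
      decide ((if PySem.List.pyGetD o i [] == PySem.List.pyGetD w i []
               then (2 : Int) else 1) ≤
        (((PySem.List.pyRange 0 n 1).map (fun j =>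
          (PySem.List.pyGetD w j [], PySem.List.pyGetD o j []))).count
          (PySem.List.pyGetD o i [], PySem.List.pyGetD w i []) : Int)))) := by
  rw [Bool.eq_iff_iff]
  simp only [List.any_eq_true, Bool.and_eq_true, beq_iff_eq, decide_eq_true_eq,
    PySem.List.mem_pyRange_one, List.count_eq_countP, List.countP_map, Function.comp_def]
  constructor
  · rintro ⟨i, ⟨h0i, hin⟩, j, ⟨hij, hjn⟩, h1, h2⟩
    refine ⟨i, ⟨h0i, hin⟩, ?_⟩
    have himem : i ∈ PySem.List.pyRange 0 n 1 := PySem.List.mem_pyRange_one.mpr ⟨h0i, hin⟩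
    have hjmem : j ∈ PySem.List.pyRange 0 n 1 := PySem.List.mem_pyRange_one.mpr ⟨by omega, hjn⟩
    have hQj : ((PySem.List.pyGetD w j [], PySem.List.pyGetD o j []) ==
        (PySem.List.pyGetD o i [], PySem.List.pyGetD w i [])) = true := by
      simp [h1.symm, h2]
    split_ifs with hii
    · have hQi : ((PySem.List.pyGetD w i [], PySem.List.pyGetD o i []) ==
          (PySem.List.pyGetD o i [], PySem.List.pyGetD w i [])) = true := by
        simp [hii]
      have := two_le_countP
        (p := fun k => (PySem.List.pyGetD w k [], PySem.List.pyGetD o k []) ==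
          (PySem.List.pyGetD o i [], PySem.List.pyGetD w i []))
        (PySem.List.nodup_pyRange_one 0 n) himem hjmem (by omega : i ≠ j) hQi hQj
      exact_mod_cast this
    · have : 0 < (PySem.List.pyRange 0 n 1).countP (fun k =>
          (PySem.List.pyGetD w k [], PySem.List.pyGetD o k []) ==
          (PySem.List.pyGetD o i [], PySem.List.pyGetD w i [])) :=
        List.countP_pos_iff.mpr ⟨j, hjmem, hQj⟩
      omega
  · rintro ⟨i, ⟨h0i, hin⟩, hle⟩
    have himem : i ∈ PySem.List.pyRange 0 n 1 := PySem.List.mem_pyRange_one.mpr ⟨h0i, hin⟩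
    split_ifs at hle with hii
    · have h2c : 2 ≤ (PySem.List.pyRange 0 n 1).countP (fun k =>
          (PySem.List.pyGetD w k [], PySem.List.pyGetD o k []) ==
          (PySem.List.pyGetD o i [], PySem.List.pyGetD w i [])) := by exact_mod_cast hle
      obtain ⟨a, ha, b, hb, hab, hpa, hpb⟩ :=
        exists_two_of_two_le_countP (PySem.List.nodup_pyRange_one 0 n) h2c
      simp only [Prod.mk.injEq, beq_iff_eq] at hpa hpb
      rcases eq_or_ne a i with h | hai
      · exact pair_of_ne o w n i b h0i hin (PySem.List.mem_pyRange_one.mp hb) (h ▸ hab) hpb.1.symm hpb.2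
      · exact pair_of_ne o w n i a h0i hin (PySem.List.mem_pyRange_one.mp ha) hai.symm hpa.1.symm hpa.2
    · have h1c : 0 < (PySem.List.pyRange 0 n 1).countP (fun k =>
          (PySem.List.pyGetD w k [], PySem.List.pyGetD o k []) ==
          (PySem.List.pyGetD o i [], PySem.List.pyGetD w i [])) := by omega
      obtain ⟨a, ha, hpa⟩ := List.countP_pos_iff.mp h1c
      simp only [Prod.mk.injEq, beq_iff_eq] at hpa
      have hai : a ≠ i := by rintro rfl; exact hii (hpa.1.symm)
      exact pair_of_ne o w n i a h0i hin (PySem.List.mem_pyRange_one.mp ha) hai.symm hpa.1.symm hpa.2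


-- ===== VERDICT (by name: the statement is the Claim_ definition above) =====
theorem is_valid_motion_spec : Claim_equal_is_valid_motion := by
  intro o w _
  unfold Spec_is_valid_motion is_valid_motion is_valid_motion_alt
  simp only [cnt_getD, edge_scan_eq]
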